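-- pv_equiv track=rewrite | github.com/kanemoto-shunichi/algorithm | コーディング/Mediumアルゴリズム.py | solution_frogs
-- ===== SOURCE A (Python) =====
-- def solution_frogs(blocks):
--     N = len(blocks)
--     if N == 0:
--         return 0
--     L = [0] * N
--     R = [0] * N
--     for i in range(N):
--         if i > 0 and blocks[i-1] >= blocks[i]:
--             L[i] = L[i-1]
--         else:
--             L[i] = i
--     for i in range(N - 1, -1, -1):
--         if i < N - 1 and blocks[i+1] >= blocks[i]:
--             R[i] = R[i+1]
--         else:
--             R[i] = i
--     max_dist = 0
--     for i in range(N):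
--         dist = R[i] - L[i] + 1
--         if dist > max_dist:
--             max_dist = dist
--     return max_dist
-- ===== SOURCE B (Python) =====
-- def solution_frogs(blocks):
--     # Single left-to-right pass: track the length of the current non-increasing
--     # suffix (d) and of the current down-then-up suffix (v); answer = max v.
--     if not blocks:
--         return 0
--     d = v = best = 1
--     prev = blocks[0]
--     for cur in blocks[1:]:
--         d = d + 1 if prev >= cur else 1
--         v = v + 1 if prev <= cur else d
--         if v > best:
--             best = v
--         prev = cur
--     return best
-- ===== Notes on version B (the rewrite author's own statement) =====
-- stated objective: simpler
-- what changed: Replaced the three index passes over two auxiliary tables L and R (forward run-start pass, backward run-end pass, max pass) by a single left-to-right pass keeping O(1) state: the length of the current non-increasing suffix and of the current down-then-up suffix, with a running maximum.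
import Mathlib
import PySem

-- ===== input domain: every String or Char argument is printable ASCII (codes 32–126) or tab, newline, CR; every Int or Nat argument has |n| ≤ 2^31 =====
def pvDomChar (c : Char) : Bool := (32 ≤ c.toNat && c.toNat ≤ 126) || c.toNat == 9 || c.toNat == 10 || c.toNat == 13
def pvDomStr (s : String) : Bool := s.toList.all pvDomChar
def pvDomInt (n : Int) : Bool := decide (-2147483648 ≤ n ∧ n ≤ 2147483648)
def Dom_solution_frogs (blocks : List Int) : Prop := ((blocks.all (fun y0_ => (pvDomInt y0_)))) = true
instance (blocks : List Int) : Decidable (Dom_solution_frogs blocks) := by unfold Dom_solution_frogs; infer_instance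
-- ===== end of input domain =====

-- B replaces A's three index-table passes (L, R, max) by one left-to-right pass
-- keeping O(1) state (objective: simpler / constant space); return value only, no mutation.

-- ===== PORT A =====
-- first loop: for i in range(N): L[i] = L[i-1] if i>0 and blocks[i-1]>=blocks[i] else i
def frogsL (blocks : List Int) (N : Nat) (i : Nat) (L : List Int) : List Int :=
  if i < N then
    frogsL blocks N (i+1)
      (PySem.List.pySetD L (i : Int)
        (if 0 < i ∧ PySem.List.pyGetD blocks ((i : Int) - 1) 0 ≥ PySem.List.pyGetD blocks (i : Int) 0
         then PySem.List.pyGetD L ((i : Int) - 1) 0 else (i : Int)))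
  else L
termination_by N - i

-- second loop: for i in range(N-1, -1, -1), written on the counter k = i+1
def frogsR (blocks : List Int) (N : Nat) : Nat → List Int → List Int
  | 0, R => R
  | (k+1), R =>
    frogsR blocks N k
      (PySem.List.pySetD R (k : Int)
        (if k < N - 1 ∧ PySem.List.pyGetD blocks ((k : Int) + 1) 0 ≥ PySem.List.pyGetD blocks (k : Int) 0
         then PySem.List.pyGetD R ((k : Int) + 1) 0 else (k : Int)))

-- third loop: max_dist accumulation
def frogsMax (L R : List Int) (N : Nat) (i : Nat) (m : Int) : Int :=
  if i < N then
    frogsMax L R N (i+1)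
      (let dist := PySem.List.pyGetD R (i : Int) 0 - PySem.List.pyGetD L (i : Int) 0 + 1
       if dist > m then dist else m)
  else m
termination_by N - i

def solution_frogs (blocks : List Int) : Int :=
  let N := blocks.length
  if N = 0 then 0
  else
    let L0 := List.replicate N (0 : Int)
    let R0 := List.replicate N (0 : Int)
    let L := frogsL blocks N 0 L0
    let R := frogsR blocks N N R0
    frogsMax L R N 0 0

-- ===== PORT B =====
-- single pass; state (d, v, best, prev): d = length of current non-increasing
-- suffix, v = length of current down-then-up suffix, best = running maximum
def solution_frogs_alt (blocks : List Int) : Int :=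
  match blocks with
  | [] => 0
  | h :: t =>
    (t.foldl
      (fun (st : Int × Int × Int × Int) cur =>
        let d := if st.2.2.2 ≥ cur then st.1 + 1 else 1
        let v := if st.2.2.2 ≤ cur then st.2.1 + 1 else d
        let best := if v > st.2.2.1 then v else st.2.2.1
        (d, v, best, cur))
      (1, 1, 1, h)).2.2.1

-- ===== PRECONDITION & SPEC =====
def Spec_solution_frogs (blocks : List Int) (out : Int) : Prop := out = solution_frogs_alt blocks
instance (blocks : List Int) (out : Int) : Decidable (Spec_solution_frogs blocks out) := by unfold Spec_solution_frogs; infer_instance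

-- ===== CLAIM (what is proved, stated in full; the proofs are below) =====
def Claim_equal_solution_frogs : Prop := ∀ (blocks : List Int), Dom_solution_frogs blocks → Spec_solution_frogs blocks (solution_frogs blocks)

-- ===== LEMMAS AND PROOFS =====

-- index view of the list
def fG (bs : List Int) (i : Nat) : Int := bs.getD i 0

-- start of the maximal non-increasing run ending at i (A's L[i])
def fLf (bs : List Int) : Nat → Nat
  | 0 => 0
  | i+1 => if fG bs i ≥ fG bs (i+1) then fLf bs i else i+1

-- end of the maximal non-decreasing run starting at i (A's R[i])
def fRf (bs : List Int) (N : Nat) (i : Nat) : Nat :=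
  if h : i + 1 < N ∧ fG bs (i+1) ≥ fG bs i then fRf bs N (i+1) else i
termination_by N - i
decreasing_by omega

-- start of the maximal non-decreasing run ending at j
def fUf (bs : List Int) : Nat → Nat
  | 0 => 0
  | j+1 => if fG bs j ≤ fG bs (j+1) then fUf bs j else j+1

-- start of the maximal down-then-up suffix ending at j
def fWf (bs : List Int) : Nat → Nat
  | 0 => 0
  | j+1 => if fG bs j ≤ fG bs (j+1) then fWf bs j else fLf bs (j+1)

def fF (bs : List Int) (N : Nat) (i : Nat) : Int := (fRf bs N i : Int) - (fLf bs i : Int) + 1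
def fV (bs : List Int) (j : Nat) : Int := (j : Int) - (fWf bs j : Int) + 1
def fD (bs : List Int) (j : Nat) : Int := (j : Int) - (fLf bs j : Int) + 1

-- running maximum of fV over 0..j
def fM (bs : List Int) : Nat → Int
  | 0 => 1
  | j+1 => if fV bs (j+1) > fM bs j then fV bs (j+1) else fM bs j

theorem fLf_le (bs : List Int) (i : Nat) : fLf bs i ≤ i := by
  induction i with
  | zero => simp [fLf]
  | succ i ih => simp only [fLf]; split <;> omega

theorem fLf_mono (bs : List Int) {i j : Nat} (h : i ≤ j) : fLf bs i ≤ fLf bs j := by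
  induction j with
  | zero =>
    have h0 : i = 0 := by omega
    subst h0; exact le_refl _
  | succ j ih =>
    rcases Nat.eq_or_lt_of_le h with h' | h'
    · subst h'; exact le_refl _
    · have h1 := ih (by omega)
      have h2 := fLf_le bs j
      simp only [fLf]; split <;> omega

theorem fUf_le (bs : List Int) (j : Nat) : fUf bs j ≤ j := by
  induction j with
  | zero => simp [fUf]
  | succ j ih => simp only [fUf]; split <;> omega

theorem fWf_eq (bs : List Int) (j : Nat) : fWf bs j = fLf bs (fUf bs j) := by
  induction j with
  | zero => simp [fWf, fUf, fLf]
  | succ j ih =>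
    simp only [fWf, fUf]
    split <;> simp [ih]

-- segment [fUf j .. j] is non-decreasing
theorem fUf_seg (bs : List Int) (j : Nat) :
    ∀ k, fUf bs j ≤ k → k < j → fG bs k ≤ fG bs (k+1) := by
  induction j with
  | zero => intro k h1 h2; omega
  | succ j ih =>
    intro k hk hk'
    simp only [fUf] at hk
    split at hk
    · rcases Nat.lt_or_ge k j with h | h
      · exact ih k hk h
      · have : k = j := by omega
        subst this; assumption
    · omega

-- a non-decreasing segment ending at j forces fUf j ≤ i
theorem fUf_le_of_seg (bs : List Int) (j : Nat) :
    ∀ i, i ≤ j → (∀ k, i ≤ k → k < j → fG bs k ≤ fG bs (k+1)) → fUf bs j ≤ i := by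
  induction j with
  | zero => intro i hi _; simp only [fUf]; omega
  | succ j ih =>
    intro i hi hseg
    rcases Nat.eq_or_lt_of_le hi with h | h
    · subst h; exact fUf_le bs (j+1)
    · have hj : fG bs j ≤ fG bs (j+1) := hseg j (by omega) (by omega)
      simp only [fUf, if_pos hj]
      exact ih i (by omega) (fun k h1 h2 => hseg k h1 (by omega))

theorem fRf_ge (bs : List Int) (N : Nat) (i : Nat) : i ≤ fRf bs N i := by
  rw [fRf]
  split
  · have := fRf_ge bs N (i+1); omega
  · omega
termination_by N - i
decreasing_by omega

theorem fRf_lt (bs : List Int) (N : Nat) (i : Nat) (h : i < N) : fRf bs N i < N := by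
  rw [fRf]
  split
  · exact fRf_lt bs N (i+1) (by omega)
  · omega
termination_by N - i
decreasing_by omega

-- segment [i .. fRf i] is non-decreasing
theorem fRf_seg (bs : List Int) (N : Nat) (i : Nat) :
    ∀ k, i ≤ k → k < fRf bs N i → fG bs k ≤ fG bs (k+1) := by
  intro k hk hk'
  rw [fRf] at hk'
  split at hk'
  · rcases Nat.lt_or_ge i k with h | h
    · exact fRf_seg bs N (i+1) k (by omega) hk'
    · have : k = i := by omega
      subst this
      rename_i hc
      exact hc.2
  · omega
termination_by N - i
decreasing_by omega

-- a non-decreasing segment [i..j] inside range forces j ≤ fRf i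
theorem le_fRf_of_seg (bs : List Int) (N : Nat) (j : Nat) (hj : j < N) (i : Nat)
    (hi : i ≤ j) (hseg : ∀ k, i ≤ k → k < j → fG bs k ≤ fG bs (k+1)) : j ≤ fRf bs N i := by
  rcases Nat.eq_or_lt_of_le hi with h | h
  · subst h; exact fRf_ge bs N i
  · rw [fRf]
    have hcond : i + 1 < N ∧ fG bs (i+1) ≥ fG bs i :=
      ⟨by omega, hseg i (by omega) (by omega)⟩
    rw [dif_pos hcond]
    exact le_fRf_of_seg bs N j hj (i+1) (by omega) (fun k h1 h2 => hseg k (by omega) h2)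
termination_by j - i
decreasing_by omega

-- K3: each suffix value is dominated by A's span at its run start
theorem fV_le_fF (bs : List Int) (N : Nat) (j : Nat) (hj : j < N) :
    fV bs j ≤ fF bs N (fUf bs j) := by
  have h1 : j ≤ fRf bs N (fUf bs j) :=
    le_fRf_of_seg bs N j hj (fUf bs j) (fUf_le bs j) (fUf_seg bs j)
  have h2 := fWf_eq bs j
  simp only [fV, fF, h2]
  omega

-- K4: each of A's spans is dominated by the suffix value at its right end
theorem fF_le_fV (bs : List Int) (N : Nat) (i : Nat) (_hi : i < N) :
    fF bs N i ≤ fV bs (fRf bs N i) := by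
  have h1 : fUf bs (fRf bs N i) ≤ i :=
    fUf_le_of_seg bs (fRf bs N i) i (fRf_ge bs N i) (fRf_seg bs N i)
  have h2 : fLf bs (fUf bs (fRf bs N i)) ≤ fLf bs i := fLf_mono bs h1
  have h3 := fWf_eq bs (fRf bs N i)
  simp only [fF, fV, h3]
  omega

theorem fM_ge (bs : List Int) {k j : Nat} (h : k ≤ j) : fV bs k ≤ fM bs j := by
  induction j with
  | zero =>
    have : k = 0 := by omega
    subst this; simp [fM, fV, fWf]
  | succ j ih =>
    rcases Nat.eq_or_lt_of_le h with h' | h'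
    · subst h'; simp only [fM]; split <;> omega
    · have := ih (by omega)
      simp only [fM]; split <;> omega

theorem fM_le (bs : List Int) (j : Nat) (c : Int) (h : ∀ k, k ≤ j → fV bs k ≤ c) :
    fM bs j ≤ c := by
  induction j with
  | zero =>
    have := h 0 (by omega)
    simpa [fM, fV, fWf] using this
  | succ j ih =>
    have h1 := ih (fun k hk => h k (by omega))
    have h2 := h (j+1) (by omega)
    simp only [fM]; split <;> omega

-- ===== bridging port A to the index functions =====

theorem frogsL_spec (bs : List Int) (N : Nat) (hN : N = bs.length) (i : Nat) (L : List Int)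
    (hi : i ≤ N) (hlen : L.length = N) (hpre : ∀ j, j < i → L.getD j 0 = (fLf bs j : Int)) :
      (frogsL bs N i L).length = N ∧
      (∀ j, j < N → (frogsL bs N i L).getD j 0 = (fLf bs j : Int)) := by
  rw [frogsL]
  by_cases h : i < N
  · rw [if_pos h]
    set val := (if 0 < i ∧ PySem.List.pyGetD bs ((i : Int) - 1) 0 ≥ PySem.List.pyGetD bs (i : Int) 0
         then PySem.List.pyGetD L ((i : Int) - 1) 0 else (i : Int)) with hval
    have hvv : val = (fLf bs i : Int) := by
      rcases Nat.eq_zero_or_pos i with h0 | h0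
      · subst h0
        simp [hval, fLf]
      · obtain ⟨i', rfl⟩ : ∃ i', i = i' + 1 := ⟨i - 1, by omega⟩
        have hc1 : ((i' + 1 : Nat) : Int) - 1 = ((i' : Nat) : Int) := by push_cast; ring
        rw [hval, hc1]
        simp only [PySem.List.pyGetD_natCast]
        have hg1 : bs.getD i' 0 = fG bs i' := rfl
        have hg2 : bs.getD (i'+1) 0 = fG bs (i'+1) := rfl
        rw [hg1, hg2, hpre i' (by omega)]
        by_cases hge : fG bs i' ≥ fG bs (i'+1)
        · rw [if_pos ⟨by omega, hge⟩]
          simp [fLf, hge]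
        · rw [if_neg (by tauto)]
          simp [fLf, hge]
    have hset : PySem.List.pySetD L (i : Int) val = L.set i val := PySem.List.pySetD_natCast L i val
    apply frogsL_spec bs N hN (i+1) _ (by omega)
    · rw [hset]; simpa using hlen
    · intro j hj
      rw [hset]
      rcases Nat.lt_or_ge j i with hji | hji
      · rw [List.getD_eq_getElem?_getD, List.getElem?_set_ne (by omega),
            ← List.getD_eq_getElem?_getD]
        exact hpre j hji
      · have : j = i := by omega
        subst this
        rw [List.getD_eq_getElem?_getD, List.getElem?_set_self (by omega)]
        simp [hvv]
  · rw [if_neg h]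
    exact ⟨hlen, fun j hj => hpre j (by omega)⟩
termination_by N - i
decreasing_by omega

theorem frogsR_spec (bs : List Int) (N : Nat) (hN : N = bs.length) :
    ∀ k R, k ≤ N → R.length = N → (∀ j, k ≤ j → j < N → R.getD j 0 = (fRf bs N j : Int)) →
      (frogsR bs N k R).length = N ∧
      (∀ j, j < N → (frogsR bs N k R).getD j 0 = (fRf bs N j : Int)) := by
  intro k
  induction k with
  | zero =>
    intro R hk hlen hpre
    exact ⟨hlen, fun j hj => hpre j (by omega) hj⟩
  | succ k ih =>
    intro R hk hlen hpre
    show (frogsR bs N k _).length = N ∧ _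
    set val := (if k < N - 1 ∧ PySem.List.pyGetD bs ((k : Int) + 1) 0 ≥ PySem.List.pyGetD bs (k : Int) 0
         then PySem.List.pyGetD R ((k : Int) + 1) 0 else (k : Int)) with hval
    have hvv : val = (fRf bs N k : Int) := by
      rw [hval]
      have hc1 : ((k : Nat) : Int) + 1 = (((k+1 : Nat)) : Int) := by push_cast; ring
      rw [hc1]
      simp only [PySem.List.pyGetD_natCast]
      have hg1 : bs.getD k 0 = fG bs k := rfl
      have hg2 : bs.getD (k+1) 0 = fG bs (k+1) := rfl
      rw [hg1, hg2]
      by_cases hc : k + 1 < N ∧ fG bs (k+1) ≥ fG bs k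
      · rw [if_pos ⟨by omega, hc.2⟩, hpre (k+1) (by omega) (by omega)]
        conv_rhs => rw [fRf]
        rw [dif_pos hc]
      · have hnc : ¬ (k < N - 1 ∧ fG bs (k+1) ≥ fG bs k) := by
          intro hx; exact hc ⟨by omega, hx.2⟩
        rw [if_neg hnc]
        conv_rhs => rw [fRf]
        rw [dif_neg hc]
    have hset : PySem.List.pySetD R (k : Int) val = R.set k val := PySem.List.pySetD_natCast R k val
    apply ih _ (by omega)
    · rw [hset]; simpa using hlen
    · intro j hj1 hj2
      rw [hset]
      rcases Nat.lt_or_ge k j with hkj | hkj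
      · rw [List.getD_eq_getElem?_getD, List.getElem?_set_ne (by omega),
            ← List.getD_eq_getElem?_getD]
        exact hpre j (by omega) hj2
      · have : j = k := by omega
        subst this
        rw [List.getD_eq_getElem?_getD, List.getElem?_set_self (by omega)]
        simp [hvv]

theorem frogsMax_le (bs L R : List Int) (N : Nat)
    (hL : ∀ j, j < N → L.getD j 0 = (fLf bs j : Int))
    (hR : ∀ j, j < N → R.getD j 0 = (fRf bs N j : Int))
    (i : Nat) (m c : Int) (hm : m ≤ c)
    (hall : ∀ j, i ≤ j → j < N → fF bs N j ≤ c) : frogsMax L R N i m ≤ c := by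
  rw [frogsMax]
  by_cases h : i < N
  · rw [if_pos h]
    apply frogsMax_le bs L R N hL hR (i+1)
    · dsimp only
      simp only [PySem.List.pyGetD_natCast]
      rw [hL i h, hR i h]
      have h1 := hall i (by omega) h
      simp only [fF] at h1
      split <;> omega
    · intro j h1 h2; exact hall j (by omega) h2
  · rw [if_neg h]; exact hm
termination_by N - i
decreasing_by omega

theorem le_frogsMax (bs L R : List Int) (N : Nat)
    (hL : ∀ j, j < N → L.getD j 0 = (fLf bs j : Int))
    (hR : ∀ j, j < N → R.getD j 0 = (fRf bs N j : Int))
    (i : Nat) (m : Int) :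
    m ≤ frogsMax L R N i m ∧
      ∀ j, i ≤ j → j < N → fF bs N j ≤ frogsMax L R N i m := by
  rw [frogsMax]
  by_cases h : i < N
  · rw [if_pos h]
    obtain ⟨h1, h2⟩ := le_frogsMax bs L R N hL hR (i+1)
      (let dist := PySem.List.pyGetD R (i : Int) 0 - PySem.List.pyGetD L (i : Int) 0 + 1
       if dist > m then dist else m)
    constructor
    · refine le_trans ?_ h1
      dsimp only
      split <;> omega
    · intro j hij hjN
      rcases Nat.lt_or_ge i j with hj | hj
      · exact h2 j (by omega) hjN
      · have hji : j = i := by omega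
        subst hji
        refine le_trans ?_ h1
        dsimp only
        simp only [PySem.List.pyGetD_natCast]
        rw [hL j hjN, hR j hjN]
        simp only [fF]
        split <;> omega
  · rw [if_neg h]
    exact ⟨le_refl m, fun j h1 h2 => absurd (by omega : i < N) h⟩
termination_by N - i
decreasing_by omega

-- A's result equals the running maximum of the suffix values
theorem frogsMax_eq_fM (bs L R : List Int) (N : Nat) (hN : 0 < N)
    (hL : ∀ j, j < N → L.getD j 0 = (fLf bs j : Int))
    (hR : ∀ j, j < N → R.getD j 0 = (fRf bs N j : Int)) :
    frogsMax L R N 0 0 = fM bs (N - 1) := by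
  apply le_antisymm
  · apply frogsMax_le bs L R N hL hR 0 0 (fM bs (N-1))
    · have h0 := fM_ge bs (k := 0) (j := N-1) (by omega)
      simp only [fV, fWf] at h0
      omega
    · intro j _ hj
      calc fF bs N j ≤ fV bs (fRf bs N j) := fF_le_fV bs N j hj
        _ ≤ fM bs (N-1) := fM_ge bs (by have := fRf_lt bs N j hj; omega)
  · apply fM_le
    intro k hk
    have hkN : k < N := by omega
    calc fV bs k ≤ fF bs N (fUf bs k) := fV_le_fF bs N k hkN
      _ ≤ frogsMax L R N 0 0 :=
        (le_frogsMax bs L R N hL hR 0 0).2 (fUf bs k) (by omega)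
          (by have := fUf_le bs k; omega)

-- ===== bridging port B to the index functions =====

def fStep : Int × Int × Int × Int → Int → Int × Int × Int × Int :=
  fun st cur =>
    let d := if st.2.2.2 ≥ cur then st.1 + 1 else 1
    let v := if st.2.2.2 ≤ cur then st.2.1 + 1 else d
    let best := if v > st.2.2.1 then v else st.2.2.1
    (d, v, best, cur)

def fState (bs : List Int) (j : Nat) : Int × Int × Int × Int :=
  (fD bs j, fV bs j, fM bs j, fG bs j)

theorem fD_step (bs : List Int) (j : Nat) :
    (if fG bs j ≥ fG bs (j+1) then fD bs j + 1 else 1) = fD bs (j+1) := by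
  by_cases h : fG bs j ≥ fG bs (j+1)
  · rw [if_pos h]
    have hl : fLf bs (j+1) = fLf bs j := by simp [fLf, h]
    simp only [fD, hl]
    push_cast; ring
  · rw [if_neg h]
    have hl : fLf bs (j+1) = j+1 := by simp [fLf, h]
    simp only [fD, hl]
    push_cast; ring

theorem fV_step (bs : List Int) (j : Nat) :
    (if fG bs j ≤ fG bs (j+1) then fV bs j + 1
     else (if fG bs j ≥ fG bs (j+1) then fD bs j + 1 else 1)) = fV bs (j+1) := by
  by_cases h : fG bs j ≤ fG bs (j+1)
  · rw [if_pos h]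
    have hw : fWf bs (j+1) = fWf bs j := by simp [fWf, h]
    simp only [fV, hw]
    push_cast; ring
  · have hge : fG bs j ≥ fG bs (j+1) := by omega
    rw [if_neg h, if_pos hge]
    have hw : fWf bs (j+1) = fLf bs j := by simp [fWf, fLf, h, hge]
    simp only [fV, fD, hw]
    push_cast; ring

theorem fStep_state (bs : List Int) (j : Nat) :
    fStep (fState bs j) (fG bs (j+1)) = fState bs (j+1) := by
  show (_, _, _, _) = _
  simp only [fState]
  rw [fV_step bs j, fD_step bs j]
  rfl

theorem foldl_fStep (bs : List Int) (N : Nat) (hN : N = bs.length) (j : Nat) (hj : j < N) :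
    List.foldl fStep (fState bs j) (bs.drop (j+1)) = fState bs (N-1) := by
  by_cases h : j + 1 < N
  · have hdrop : bs.drop (j+1) = bs[j+1] :: bs.drop (j+2) := by
      rw [List.drop_eq_getElem_cons (by omega)]
    rw [hdrop, List.foldl_cons]
    have hg : bs[j+1] = fG bs (j+1) := by
      simp [fG, List.getD_eq_getElem?_getD, List.getElem?_eq_getElem (show j+1 < bs.length by omega)]
    rw [hg, fStep_state bs j]
    exact foldl_fStep bs N hN (j+1) (by omega)
  · have hj1 : j = N - 1 := by omega
    have hnil : bs.drop (j+1) = [] := by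
      apply List.drop_eq_nil_of_le; omega
    rw [hnil, List.foldl_nil, hj1]
termination_by N - j
decreasing_by omega

theorem alt_eq_fM (bs : List Int) (hbs : bs ≠ []) :
    solution_frogs_alt bs = fM bs (bs.length - 1) := by
  obtain ⟨h, t, rfl⟩ : ∃ h t, bs = h :: t := by
    cases bs with
    | nil => exact absurd rfl hbs
    | cons h t => exact ⟨h, t, rfl⟩
  have h0 : fState (h :: t) 0 = (1, 1, 1, h) := by
    simp [fState, fD, fV, fM, fG, fLf, fWf]
  have hfold := foldl_fStep (h :: t) (h :: t).length rfl 0 (by simp)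
  rw [h0] at hfold
  show (List.foldl fStep (1,1,1,h) t).2.2.1 = _
  have ht : t = (h :: t).drop 1 := rfl
  rw [ht, hfold]
  rfl

-- ===== VERDICT (by name: the statement is the Claim_ definition above) =====
theorem solution_frogs_spec : Claim_equal_solution_frogs := by
  intro bs _
  unfold Spec_solution_frogs
  by_cases hN : bs.length = 0
  · have hnil : bs = [] := List.eq_nil_of_length_eq_zero hN
    subst hnil
    rfl
  · have hbs : bs ≠ [] := by
      intro h; subst h; exact hN rfl
    have hNpos : 0 < bs.length := by omega
    unfold solution_frogs
    simp only [if_neg hN]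
    obtain ⟨hLlen, hLget⟩ := frogsL_spec bs bs.length rfl 0
      (List.replicate bs.length (0:Int)) (by omega) (by simp) (by omega)
    obtain ⟨hRlen, hRget⟩ := frogsR_spec bs bs.length rfl bs.length
      (List.replicate bs.length (0:Int)) (by omega) (by simp) (by omega)
    rw [frogsMax_eq_fM bs _ _ bs.length hNpos hLget hRget, alt_eq_fM bs hbs]
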